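-- pv_equiv track=rewrite | github.com/RicardoSdV/TimQs | nineFac/tim.py | tim_seq
-- ===== SOURCE A (Python) =====
-- from collections import deque
--
-- def tim_seq(low, high):
--     res = []
--     queue = deque(range(1, 10))
--
--     while queue:
--         n = queue.popleft()
--         if n > high:
--             continue
--         if low <= n <= high:
--             res.append(n)
--
--         last = n % 10
--
--         if last < 9:
--             queue.append(n*10 + last+1)
--
--     return res
-- ===== SOURCE B (Python) =====
-- def tim_seq(low, high):
--     res = []
--     for length in range(1, 10):
--         for start in range(1, 11 - length):
--             n = 0
--             for d in range(start, start + length):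
--                 n = n * 10 + d
--             if low <= n <= high:
--                 res.append(n)
--     return res
-- ===== Notes on version B (the rewrite author's own statement) =====
-- stated objective: simpler
-- what changed: Replaces the BFS over a deque (popping numbers and enqueueing digit-extended children with a > high prune) by direct nested enumeration: for each length 1..9 and start digit, build the consecutive-digit number by folding n = n*10 + d and keep it iff low <= n <= high.
import Mathlib
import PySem

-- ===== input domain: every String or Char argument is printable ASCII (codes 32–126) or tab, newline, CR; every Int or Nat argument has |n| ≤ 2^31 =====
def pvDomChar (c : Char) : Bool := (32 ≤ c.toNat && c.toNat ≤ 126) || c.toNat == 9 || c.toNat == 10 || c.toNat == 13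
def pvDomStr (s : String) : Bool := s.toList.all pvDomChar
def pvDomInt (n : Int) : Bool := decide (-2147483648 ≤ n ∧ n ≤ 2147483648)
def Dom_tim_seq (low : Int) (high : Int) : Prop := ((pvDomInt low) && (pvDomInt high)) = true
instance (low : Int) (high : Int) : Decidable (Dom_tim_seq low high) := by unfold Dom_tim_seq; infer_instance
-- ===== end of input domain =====

-- B replaces A's deque BFS by direct nested enumeration of the ≤45 candidates; objective: simpler.

-- ===== PORT A =====
-- measure for the while loop: each popped element n has weight (10 - n%10) ≥ 1 and
-- contributes at most one child of strictly smaller weight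
def timMeasure (q : List Int) : Nat := (q.map (fun n => (10 - PySem.Int.mod n 10).toNat)).sum

theorem timWeight_pos (n : Int) : 0 < (10 - PySem.Int.mod n 10).toNat := by
  have h := PySem.Int.mod_eq_emod_of_pos (a := n) (b := 10) (by norm_num)
  have h1 := Int.emod_nonneg n (by norm_num : (10:Int) ≠ 0)
  have h2 := Int.emod_lt_of_pos n (by norm_num : (0:Int) < 10)
  omega

theorem timWeight_child (n : Int) (h : PySem.Int.mod n 10 < 9) :
    (10 - PySem.Int.mod (n * 10 + PySem.Int.mod n 10 + 1) 10).toNat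
      < (10 - PySem.Int.mod n 10).toNat := by
  have e1 := PySem.Int.mod_eq_emod_of_pos (a := n) (b := 10) (by norm_num)
  have e2 := PySem.Int.mod_eq_emod_of_pos (a := n * 10 + PySem.Int.mod n 10 + 1) (b := 10) (by norm_num)
  have h1 := Int.emod_nonneg n (by norm_num : (10:Int) ≠ 0)
  have h2 := Int.emod_lt_of_pos n (by norm_num : (0:Int) < 10)
  have : (n * 10 + PySem.Int.mod n 10 + 1) % 10 = (PySem.Int.mod n 10 + 1) % 10 := by
    rw [e1]; omega
  have hsmall : (PySem.Int.mod n 10 + 1) % 10 = PySem.Int.mod n 10 + 1 := by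
    rw [Int.emod_eq_of_lt] <;> omega
  omega

-- the while loop of A, state (res, queue)
def timLoop (low : Int) (high : Int) (res : List Int) (queue : List Int) : List Int :=
  match queue with
  | [] => res
  | n :: rest =>
    if high < n then timLoop low high res rest
    else
      let res' := if low ≤ n ∧ n ≤ high then res ++ [n] else res
      let last := PySem.Int.mod n 10
      if hlt : last < 9 then timLoop low high res' (rest ++ [n * 10 + last + 1])
      else timLoop low high res' rest
termination_by timMeasure queue
decreasing_by
  · simp [timMeasure]; have := timWeight_pos n; omega
  · simp only [timMeasure, List.map_append, List.sum_append, List.map_cons, List.sum_cons,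
      List.map_nil, List.sum_nil]
    have := timWeight_child n hlt; omega
  · simp [timMeasure]; have := timWeight_pos n; omega

def tim_seq (low : Int) (high : Int) : List Int :=
  timLoop low high [] (PySem.List.pyRange 1 10 1)

-- ===== PORT B =====
def tim_seq_alt (low : Int) (high : Int) : List Int :=
  (PySem.List.pyRange 1 10 1).foldl (fun res length =>
    (PySem.List.pyRange 1 (11 - length) 1).foldl (fun res start =>
      let n := (PySem.List.pyRange start (start + length) 1).foldl (fun n d => n * 10 + d) 0
      if low ≤ n ∧ n ≤ high then res ++ [n] else res) res) []

-- ===== PRECONDITION & SPEC =====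
def Spec_tim_seq (low : Int) (high : Int) (out : List Int) : Prop := out = tim_seq_alt low high
instance (low : Int) (high : Int) (out : List Int) : Decidable (Spec_tim_seq low high out) := by unfold Spec_tim_seq; infer_instance

-- ===== CLAIM (what is proved, stated in full; the proofs are below) =====
def Claim_equal_tim_seq : Prop := ∀ (low : Int) (high : Int), Dom_tim_seq low high → Spec_tim_seq low high (tim_seq low high)

-- ===== LEMMAS AND PROOFS =====

-- the full chain of candidates generated from a queue, with no pruning and no filtering
def timExpand (queue : List Int) : List Int :=
  match queue with
  | [] => []
  | n :: rest =>
    if hlt : PySem.Int.mod n 10 < 9 then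
      n :: timExpand (rest ++ [n * 10 + PySem.Int.mod n 10 + 1])
    else n :: timExpand rest
termination_by timMeasure queue
decreasing_by
  · simp only [timMeasure, List.map_append, List.sum_append, List.map_cons, List.sum_cons,
      List.map_nil, List.sum_nil]
    have := timWeight_child n hlt; omega
  · simp [timMeasure]; have := timWeight_pos n; omega

-- the concrete candidate list: timExpand [1..9]
def timE : List Int :=
  [1, 2, 3, 4, 5, 6, 7, 8, 9, 12, 23, 34, 45, 56, 67, 78, 89, 123, 234, 345, 456, 567, 678,
   789, 1234, 2345, 3456, 4567, 5678, 6789, 12345, 23456, 34567, 45678, 56789, 123456,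
   234567, 345678, 456789, 1234567, 2345678, 3456789, 12345678, 23456789, 123456789]

theorem child_ge (n : Int) (h1 : 1 ≤ n) :
    n < n * 10 + PySem.Int.mod n 10 + 1 ∧ 1 ≤ n * 10 + PySem.Int.mod n 10 + 1 := by
  have e1 := PySem.Int.mod_eq_emod_of_pos (a := n) (b := 10) (by norm_num)
  have := Int.emod_nonneg n (by norm_num : (10:Int) ≠ 0)
  constructor <;> nlinarith

-- dropping a whole subtree above `high` does not change the filtered chain
theorem timExpand_drop (low high : Int) (q1 q2 : List Int) (c : Int)
    (hc1 : 1 ≤ c) (hc2 : high < c) :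
    (timExpand (q1 ++ c :: q2)).filter (fun n => decide (low ≤ n ∧ n ≤ high))
      = (timExpand (q1 ++ q2)).filter (fun n => decide (low ≤ n ∧ n ≤ high)) := by
  match q1 with
  | [] =>
    simp only [List.nil_append]
    rw [timExpand]
    by_cases hlt : PySem.Int.mod c 10 < 9
    · simp only [dif_pos hlt, List.filter_cons]
      have hcfail : (decide (low ≤ c ∧ c ≤ high)) = false := by
        simp; intro _; omega
      rw [hcfail]
      have hch := child_ge c hc1
      have := timExpand_drop low high q2 [] (c * 10 + PySem.Int.mod c 10 + 1)
        hch.2 (by omega)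
      simpa using this
    · simp only [dif_neg hlt, List.filter_cons]
      have hcfail : (decide (low ≤ c ∧ c ≤ high)) = false := by
        simp; intro _; omega
      rw [hcfail]; simp
  | n :: q1' =>
    simp only [List.cons_append]
    rw [timExpand, timExpand]
    by_cases hlt : PySem.Int.mod n 10 < 9
    · simp only [dif_pos hlt, List.filter_cons]
      have h1 : q1' ++ c :: q2 ++ [n * 10 + PySem.Int.mod n 10 + 1]
          = q1' ++ c :: (q2 ++ [n * 10 + PySem.Int.mod n 10 + 1]) := by simp
      have h2 : q1' ++ q2 ++ [n * 10 + PySem.Int.mod n 10 + 1]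
          = q1' ++ (q2 ++ [n * 10 + PySem.Int.mod n 10 + 1]) := by simp
      rw [h1, h2, timExpand_drop low high q1' (q2 ++ [n * 10 + PySem.Int.mod n 10 + 1]) c hc1 hc2]
    · simp only [dif_neg hlt, List.filter_cons]
      rw [timExpand_drop low high q1' q2 c hc1 hc2]
termination_by timMeasure (q1 ++ c :: q2)
decreasing_by
  · simp only [timMeasure, List.map_append, List.sum_append, List.map_cons, List.sum_cons,
      List.map_nil, List.sum_nil, List.nil_append]
    have := timWeight_child c hlt; omega
  · simp only [timMeasure, List.map_append, List.sum_append, List.map_cons, List.sum_cons,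
      List.map_nil, List.sum_nil, List.cons_append]
    have := timWeight_child n hlt; omega
  · simp only [timMeasure, List.map_append, List.sum_append, List.map_cons, List.sum_cons,
      List.map_nil, List.sum_nil, List.cons_append]
    have := timWeight_pos n; omega

-- the loop computes res ++ filtered chain
theorem timLoop_eq (low high : Int) (res : List Int) (q : List Int)
    (hq : ∀ x ∈ q, 1 ≤ x) :
    timLoop low high res q
      = res ++ (timExpand q).filter (fun n => decide (low ≤ n ∧ n ≤ high)) := by
  match q with
  | [] => simp [timLoop, timExpand]
  | n :: rest =>
    have hn : 1 ≤ n := hq n (by simp)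
    have hrest : ∀ x ∈ rest, 1 ≤ x := fun x hx => hq x (by simp [hx])
    rw [timLoop, timExpand]
    by_cases hhigh : high < n
    · simp only [if_pos hhigh]
      rw [timLoop_eq low high res rest hrest]
      by_cases hlt : PySem.Int.mod n 10 < 9
      · simp only [dif_pos hlt, List.filter_cons]
        have hnfail : (decide (low ≤ n ∧ n ≤ high)) = false := by
          simp; intro _; omega
        rw [hnfail]
        have hch := child_ge n hn
        have := timExpand_drop low high rest [] (n * 10 + PySem.Int.mod n 10 + 1)
          hch.2 (by omega)
        simp only [List.append_nil] at this
        rw [this]; simp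
      · simp only [dif_neg hlt, List.filter_cons]
        have hnfail : (decide (low ≤ n ∧ n ≤ high)) = false := by
          simp; intro _; omega
        rw [hnfail]; simp
    · simp only [if_neg hhigh]
      have hch := child_ge n hn
      by_cases hlt : PySem.Int.mod n 10 < 9
      · simp only [dif_pos hlt, List.filter_cons]
        rw [timLoop_eq low high _ (rest ++ [n * 10 + PySem.Int.mod n 10 + 1])
          (by intro x hx
              rcases List.mem_append.1 hx with h | h
              · exact hrest x h
              · simp at h; omega)]
        by_cases hlow : low ≤ n ∧ n ≤ high
        · simp [hlow]
        · simp [hlow]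
      · simp only [dif_neg hlt, List.filter_cons]
        rw [timLoop_eq low high _ rest hrest]
        by_cases hlow : low ≤ n ∧ n ≤ high
        · simp [hlow]
        · simp [hlow]
termination_by timMeasure q
decreasing_by
  · simp only [timMeasure, List.map_cons, List.sum_cons]
    have := timWeight_pos n; omega
  · simp only [timMeasure, List.map_append, List.sum_append, List.map_cons, List.sum_cons,
      List.map_nil, List.sum_nil]
    have := timWeight_child n hlt; omega
  · simp only [timMeasure, List.map_cons, List.sum_cons]
    have := timWeight_pos n; omega

-- B's inner loop is 'filter-map' over the start digits
theorem inner_eq (low high len : Int) : ∀ (l : List Int) (res : List Int),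
    l.foldl (fun res start =>
      let n := (PySem.List.pyRange start (start + len) 1).foldl (fun n d => n * 10 + d) 0
      if low ≤ n ∧ n ≤ high then res ++ [n] else res) res
    = res ++ (l.map (fun start =>
        (PySem.List.pyRange start (start + len) 1).foldl (fun n d => n * 10 + d) 0)).filter
          (fun n => decide (low ≤ n ∧ n ≤ high)) := by
  intro l
  induction l with
  | nil => intro res; simp
  | cons a t ih =>
    intro res
    simp only [List.foldl_cons, List.map_cons, List.filter_cons]
    rw [ih]
    by_cases h : low ≤ (PySem.List.pyRange a (a + len) 1).foldl (fun n d => n * 10 + d) 0 ∧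
        (PySem.List.pyRange a (a + len) 1).foldl (fun n d => n * 10 + d) 0 ≤ high
    · simp [h]
    · simp [h]

theorem filter_flatMap_comm (p : Int → Bool) (g : Int → List Int) :
    ∀ (l : List Int), (l.flatMap g).filter p = l.flatMap (fun x => (g x).filter p) := by
  intro l
  induction l with
  | nil => simp
  | cons a t ih => simp [List.flatMap_cons, List.filter_append, ih]

theorem altE (low high : Int) :
    tim_seq_alt low high = timE.filter (fun n => decide (low ≤ n ∧ n ≤ high)) := by
  unfold tim_seq_alt
  have hbody : ∀ (res : List Int) (length : Int),
      (PySem.List.pyRange 1 (11 - length) 1).foldl (fun res start =>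
        let n := (PySem.List.pyRange start (start + length) 1).foldl (fun n d => n * 10 + d) 0
        if low ≤ n ∧ n ≤ high then res ++ [n] else res) res
      = res ++ ((PySem.List.pyRange 1 (11 - length) 1).map (fun start =>
          (PySem.List.pyRange start (start + length) 1).foldl (fun n d => n * 10 + d) 0)).filter
            (fun n => decide (low ≤ n ∧ n ≤ high)) := fun res length =>
    inner_eq low high length _ res
  refine .trans (PySem.List.foldl_congr_mem (PySem.List.pyRange 1 10 1) _
    (fun res length => res ++ ((PySem.List.pyRange 1 (11 - length) 1).map (fun start =>
      (PySem.List.pyRange start (start + length) 1).foldl (fun n d => n * 10 + d) 0)).filter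
        (fun n => decide (low ≤ n ∧ n ≤ high))) []
    (fun res x _ => hbody res x)) ?_
  rw [PySem.List.foldl_append_eq_flatMap]
  rw [← filter_flatMap_comm]
  simp only [List.nil_append]
  congr 1

-- ===== VERDICT (by name: the statement is the Claim_ definition above) =====
theorem tim_seq_spec : Claim_equal_tim_seq := by
  intro low high _
  show tim_seq low high = tim_seq_alt low high
  rw [altE, tim_seq, timLoop_eq low high _ _ (by decide)]
  have : timExpand (PySem.List.pyRange 1 10 1) = timE := by
    rw [show PySem.List.pyRange 1 10 1 = [1,2,3,4,5,6,7,8,9] from by decide]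
    simp [timExpand, timE, PySem.Int.mod]
  rw [this, List.nil_append]
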